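-- pv_equiv track=rewrite | github.com/Jgf-2002/news_web | scripts/fetch_market_data.py | build_collection_status
-- ===== SOURCE A (Python) =====
-- from typing import Any
--
-- def build_collection_status(items: list[dict[str, Any]]) -> str:
--     statuses = [str(item.get("source_status") or "").lower() for item in items if item]
--     if not statuses:
--         return "fallback"
--     if all(status == "live" for status in statuses):
--         return "live"
--     if any(status in {"live", "partial"} for status in statuses):
--         return "degraded"
--     if any(status == "cached" for status in statuses):
--         return "stale"
--     return "fallback"
-- ===== SOURCE B (Python) =====
-- from typing import Any
--
-- def build_collection_status(items: list[dict[str, Any]]) -> str: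
--     total = n_live = n_lp = n_cached = 0
--     for item in items:
--         if not item:
--             continue
--         status = str(item.get("source_status") or "").lower()
--         total += 1
--         if status == "live":
--             n_live += 1
--         if status in ("live", "partial"):
--             n_lp += 1
--         if status == "cached":
--             n_cached += 1
--     if total == 0:
--         return "fallback"
--     if n_live == total:
--         return "live"
--     if n_lp > 0:
--         return "degraded"
--     if n_cached > 0:
--         return "stale"
--     return "fallback"
-- ===== Notes on version B (the rewrite author's own statement) =====
-- stated objective: alternative
-- what changed: Replaces the intermediate statuses list and four separate all/any scans with a single counting pass over the items and a constant-time decision from the tallies.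
import Mathlib
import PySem

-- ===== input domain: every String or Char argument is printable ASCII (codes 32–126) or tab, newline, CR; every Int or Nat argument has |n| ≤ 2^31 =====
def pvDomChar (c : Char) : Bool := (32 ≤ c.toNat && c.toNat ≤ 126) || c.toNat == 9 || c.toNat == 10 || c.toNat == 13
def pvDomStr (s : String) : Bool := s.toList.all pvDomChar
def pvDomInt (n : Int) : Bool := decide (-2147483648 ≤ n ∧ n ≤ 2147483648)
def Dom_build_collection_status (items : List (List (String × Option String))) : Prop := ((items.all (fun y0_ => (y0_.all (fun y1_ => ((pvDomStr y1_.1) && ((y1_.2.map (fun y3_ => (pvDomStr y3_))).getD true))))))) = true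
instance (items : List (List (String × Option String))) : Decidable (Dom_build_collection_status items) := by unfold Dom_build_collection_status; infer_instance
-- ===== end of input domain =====

-- B changes the decomposition: one counting pass over the items instead of an
-- intermediate statuses list scanned by four separate all/any passes.

-- ===== PORT A =====
-- str(item.get("source_status") or "").lower(): the value is None or a str, so
-- `or ""` maps None/"" to "" and str() is the identity; `.lower()` = PySem.Str.lower.
def pvNormStatus (item : List (String × Option String)) : String :=
  PySem.Str.lower ((((PySem.Dict.mk item).get? "source_status").getD none).getD "")

def build_collection_status (items : List (List (String × Option String))) : String :=
  let statuses := (items.filter (fun item => !item.isEmpty)).map pvNormStatus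
  if statuses.isEmpty then "fallback"
  else if statuses.all (fun s => s == "live") then "live"
  else if statuses.any (fun s => s == "live" || s == "partial") then "degraded"
  else if statuses.any (fun s => s == "cached") then "stale"
  else "fallback"

-- ===== PORT B =====
-- running tallies (total, n_live, n_lp, n_cached)
def pvTally (acc : Nat × Nat × Nat × Nat) (item : List (String × Option String)) :
    Nat × Nat × Nat × Nat :=
  if item.isEmpty then acc
  else
    let status := pvNormStatus item
    (acc.1 + 1,
     acc.2.1 + (if status == "live" then 1 else 0),
     acc.2.2.1 + (if status == "live" || status == "partial" then 1 else 0),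
     acc.2.2.2 + (if status == "cached" then 1 else 0))

def build_collection_status_alt (items : List (List (String × Option String))) : String :=
  let r := items.foldl pvTally (0, 0, 0, 0)
  if r.1 = 0 then "fallback"
  else if r.2.1 = r.1 then "live"
  else if 0 < r.2.2.1 then "degraded"
  else if 0 < r.2.2.2 then "stale"
  else "fallback"

-- ===== PRECONDITION & SPEC =====
def Spec_build_collection_status (items : List (List (String × Option String))) (out : String) : Prop := out = build_collection_status_alt items
instance (items : List (List (String × Option String))) (out : String) : Decidable (Spec_build_collection_status items out) := by unfold Spec_build_collection_status; infer_instance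

-- ===== CLAIM (what is proved, stated in full; the proofs are below) =====
def Claim_equal_build_collection_status : Prop := ∀ (items : List (List (String × Option String))), Dom_build_collection_status items → Spec_build_collection_status items (build_collection_status items)

-- ===== LEMMAS AND PROOFS =====

-- The fold computes length and countP tallies of A's statuses list.
theorem pvTally_foldl (items : List (List (String × Option String)))
    (t a b c : Nat) :
    items.foldl pvTally (t, a, b, c) =
      (let S := (items.filter (fun item => !item.isEmpty)).map pvNormStatus
       (t + S.length,
        a + S.countP (fun s => s == "live"),
        b + S.countP (fun s => s == "live" || s == "partial"),
        c + S.countP (fun s => s == "cached"))) := by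
  induction items generalizing t a b c with
  | nil => simp
  | cons item rest ih =>
    by_cases h : item.isEmpty
    · simp [pvTally, h, ih]
    · simp only [List.foldl_cons, pvTally, h, if_neg, List.filter_cons,
        Bool.not_eq_eq_eq_not, Bool.not_true, h, List.map_cons]
      rw [ih]
      simp [List.countP_cons]
      constructor
      · omega
      constructor
      · split_ifs <;> omega
      constructor
      · split_ifs <;> omega
      · split_ifs <;> omega

theorem build_collection_status_spec : Claim_equal_build_collection_status := by
  intro items _
  unfold Spec_build_collection_status build_collection_status build_collection_status_alt
  rw [pvTally_foldl]
  simp only []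
  set S := (items.filter (fun item => !item.isEmpty)).map pvNormStatus with hS
  simp only [Nat.zero_add]
  by_cases h0 : S.length = 0
  · simp [List.length_eq_zero_iff.mp h0]
  · have hne : ¬ S.isEmpty = true := by
      rw [List.isEmpty_iff]; exact fun h => h0 (by rw [h]; rfl)
    by_cases hall : S.all (fun s => s == "live")
    · have : S.countP (fun s => s == "live") = S.length :=
        List.countP_eq_length.2 (by simpa [List.all_eq_true] using hall)
      simp [hne, hall, h0, this]
    · have hlt : S.countP (fun s => s == "live") ≠ S.length := by
        intro hEq
        exact hall (by
          simp only [List.all_eq_true]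
          exact List.countP_eq_length.1 hEq)
      by_cases hlp : S.any (fun s => s == "live" || s == "partial")
      · have : 0 < S.countP (fun s => s == "live" || s == "partial") :=
          List.countP_pos_iff.2 (by simpa [List.any_eq_true] using hlp)
        simp [hne, hall, hlp, h0, hlt, this]
      · have hlp0 : ¬ 0 < S.countP (fun s => s == "live" || s == "partial") := by
          simp only [Nat.pos_iff_ne_zero, ne_eq, not_not]
          exact List.countP_eq_zero.2 (by
            intro s hs
            by_contra hc
            exact hlp (List.any_eq_true.2 ⟨s, hs, by simpa using hc⟩))
        by_cases hc : S.any (fun s => s == "cached")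
        · have : 0 < S.countP (fun s => s == "cached") :=
            List.countP_pos_iff.2 (by simpa [List.any_eq_true] using hc)
          simp [hne, hall, hlp, hc, h0, hlt, hlp0, this]
        · have hc0 : ¬ 0 < S.countP (fun s => s == "cached") := by
            simp only [Nat.pos_iff_ne_zero, ne_eq, not_not]
            exact List.countP_eq_zero.2 (by
              intro s hs
              by_contra hcc
              exact hc (List.any_eq_true.2 ⟨s, hs, by simpa using hcc⟩))
          simp [hne, hall, hlp, hc, h0, hlt, hlp0, hc0]
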